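-- pv_equiv track=rewrite | github.com/SaltyDot/PythonTasks | HW6.py | removed_number_count
-- ===== SOURCE A (Python) =====
-- def removed_number_count(list, number):
--     count=0
--     for i in range(len(list)):
--         i-=count
--         if list[i]==number:
--             count+=1
--             list.remove(list[i])
--     # print (list)
--     return count
-- ===== SOURCE B (Python) =====
-- def removed_number_count(list, number):
--     kept = [x for x in list if x != number]
--     count = len(list) - len(kept)
--     list[:] = kept
--     return count
-- ===== Notes on version B (the rewrite author's own statement) =====
-- stated objective: simpler
-- what changed: Replaces the index-adjusted loop with repeated list.remove scans by a single comprehension that keeps the survivors, counting the removals as the length difference and splicing the survivors back in place.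
import Mathlib
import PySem

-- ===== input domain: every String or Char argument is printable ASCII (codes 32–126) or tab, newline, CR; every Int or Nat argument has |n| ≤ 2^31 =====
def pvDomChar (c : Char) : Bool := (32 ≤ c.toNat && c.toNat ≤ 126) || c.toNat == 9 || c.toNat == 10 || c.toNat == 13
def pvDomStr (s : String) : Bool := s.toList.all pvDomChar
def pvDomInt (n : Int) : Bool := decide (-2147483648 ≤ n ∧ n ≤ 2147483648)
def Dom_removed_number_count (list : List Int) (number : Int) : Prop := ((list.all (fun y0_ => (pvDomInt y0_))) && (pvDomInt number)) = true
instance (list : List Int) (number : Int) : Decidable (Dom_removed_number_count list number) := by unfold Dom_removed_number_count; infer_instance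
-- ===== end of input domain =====

-- B keeps the survivors with one comprehension and counts removals as the length difference instead of A's repeated list.remove scans;
-- both mutate the argument list identically (all occurrences removed); the equivalence proved here is about the RETURN value.

-- ===== PORT A =====
-- A's loop state is the (mutated) list together with count; the index i is shifted by count each step.
def removed_number_count (list : List Int) (number : Int) : Int :=
  (((PySem.List.pyRange 0 (list.length : Int) 1).foldl (fun (st : List Int × Int) i =>
      let j := i - st.2
      match PySem.List.pyGet? st.1 j with
      | none => st          -- unreachable: the adjusted index is always in range (IndexError never happens)
      | some v =>
        if v == number then
          match PySem.List.remove? st.1 v with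
          | none => (st.1, st.2 + 1)   -- unreachable: v was just read from st.1
          | some l' => (l', st.2 + 1)
        else st) (list, 0))).2

-- ===== PORT B =====
-- kept = the comprehension's survivors; count = len(list) - len(kept); 'list[:] = kept' only mutates the argument
def removed_number_count_alt (list : List Int) (number : Int) : Int :=
  let kept := list.filter (fun x => !(x == number))
  (list.length : Int) - (kept.length : Int)

-- ===== PRECONDITION & SPEC =====
def Spec_removed_number_count (list : List Int) (number : Int) (out : Int) : Prop := out = removed_number_count_alt list number
instance (list : List Int) (number : Int) (out : Int) : Decidable (Spec_removed_number_count list number out) := by unfold Spec_removed_number_count; infer_instance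

-- ===== CLAIM (what is proved, stated in full; the proofs are below) =====
def Claim_equal_removed_number_count : Prop := ∀ (list : List Int) (number : Int), Dom_removed_number_count list number → Spec_removed_number_count list number (removed_number_count list number)

-- ===== LEMMAS AND PROOFS =====

-- abbreviation of A's loop body for the lemmas below
def aStep (number : Int) (st : List Int × Int) (i : Int) : List Int × Int :=
  let j := i - st.2
  match PySem.List.pyGet? st.1 j with
  | none => st
  | some v =>
    if v == number then
      match PySem.List.remove? st.1 v with
      | none => (st.1, st.2 + 1)
      | some l' => (l', st.2 + 1)
    else st

lemma removed_number_count_eq_aStep (list : List Int) (number : Int) :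
    removed_number_count list number =
    ((PySem.List.pyRange 0 (list.length : Int) 1).foldl (aStep number) (list, 0)).2 := rfl

-- invariant for A's loop: P = survivors of the processed prefix (contains no `number`),
-- R = unprocessed suffix, c = matches so far, current loop index k = P.length + c.
lemma aLoop_inv (number : Int) (P R : List Int) (c : Int)
    (hP : number ∉ P) :
    ((PySem.List.pyRange ((P.length : Int) + c) ((P.length : Int) + c + (R.length : Int)) 1).foldl
        (aStep number) (P ++ R, c)).2
    = c + (R.countP (· == number) : Int) := by
  induction R generalizing P c with
  | nil =>
    rw [PySem.List.pyRange_one_eq_nil (by simp)]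
    simp
  | cons r R ih =>
    rw [PySem.List.pyRange_one_cons (by simp only [List.length_cons]; push_cast; omega)]
    have hget : PySem.List.pyGet? (P ++ r :: R) ((P.length : Int) + c - c) = some r := by
      have : (P.length : Int) + c - c = (P.length : Int) := by ring
      rw [this, PySem.List.pyGet?_append_length]
    by_cases hr : r = number
    · subst hr
      have hrem : PySem.List.remove? (P ++ r :: R) r = some (P ++ R) := by
        rw [PySem.List.remove?_eq_some_erase (P ++ r :: R) r (by simp)]
        rw [List.erase_append_right _ (by simpa using hP)]
        simp
      have hstep : aStep r (P ++ r :: R, c) ((P.length : Int) + c) = (P ++ R, c + 1) := by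
        simp [aStep, hrem]
      rw [List.foldl_cons, hstep]
      have h1 : (P.length : Int) + c + 1 = (P.length : Int) + (c + 1) := by ring
      have h2 : (P.length : Int) + c + ((r :: R).length : Int) = (P.length : Int) + (c + 1) + (R.length : Int) := by
        simp; ring
      rw [h1, h2, ih P (c + 1) hP]
      simp
      ring
    · have hstep : aStep number (P ++ r :: R, c) ((P.length : Int) + c) = (P ++ r :: R, c) := by
        simp [aStep, hr]
      rw [List.foldl_cons, hstep]
      have hPR : P ++ r :: R = (P ++ [r]) ++ R := by simp
      have h1 : (P.length : Int) + c + 1 = (((P ++ [r]).length : Int)) + c := by simp; ring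
      have h2 : (P.length : Int) + c + ((r :: R).length : Int) = (((P ++ [r]).length : Int)) + c + (R.length : Int) := by
        simp; ring
      rw [hPR, h1, h2, ih (P ++ [r]) c (by simp [hP, Ne.symm hr])]
      simp [hr]

-- survivors plus matches partition the list
lemma filter_countP_len (l : List Int) (p : Int → Bool) :
    (l.filter (fun x => !(p x))).length + l.countP p = l.length := by
  induction l with
  | nil => rfl
  | cons x xs ih =>
    by_cases h : p x = true <;> simp [h] <;> omega

-- ===== VERDICT (by name: the statement is the Claim_ definition above) =====
theorem removed_number_count_spec : Claim_equal_removed_number_count := by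
  intro list number _
  show removed_number_count list number = removed_number_count_alt list number
  rw [removed_number_count_eq_aStep]
  have h := aLoop_inv number [] list 0 (by simp)
  simp only [List.length_nil, Int.natCast_zero, zero_add, List.nil_append] at h
  rw [h]
  show _ = (list.length : Int) - ((list.filter (fun x => !(x == number))).length : Int)
  have hlen := filter_countP_len list (· == number)
  omega
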